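-- pv_equiv track=rewrite | github.com/tempuku/algorithmic | tinkoff_qa/cycled_word.py | cycled_word
-- ===== SOURCE A (Python) =====
-- from itertools import cycle
--
-- def check_cycled(symbols, word):
--     cycled_symbols = cycle(symbols)
--     word_copy = word
--     cycled_symbols.__next__()
--     for sym in cycled_symbols:
--         if not word_copy:
--             return 'YES'
--         if word_copy[0] == sym:
--             word_copy = word_copy[1:]
--         else:
--             return 'NO'
--
-- def check_other_symbols(symbols, word, i):
--     right_answer = check_cycled(symbols[i:] + symbols[:i], word)
--     left_answer = check_cycled(symbols[i::-1] + symbols[:i:-1], word)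
--     if right_answer == 'YES' or left_answer == 'YES':
--         return 'YES'
--     else:
--         return 'NO'
--
-- def cycled_word(symbols: str, word: str):
--     for i in range(len(symbols)):
--         if symbols[i] == word[0]:
--             answer = check_other_symbols(symbols, word[1:], i)
--             if answer == 'YES':
--                 return 'YES'
--     else:
--         return 'NO'
-- ===== SOURCE B (Python) =====
-- def cycled_word(symbols: str, word: str):
--     n = len(symbols)
--     if n == 0:
--         return 'NO'
--     reps = len(word) // n + 2
--     fwd = symbols * reps
--     bwd = symbols[::-1] * reps
--     return 'YES' if (word in fwd or word in bwd) else 'NO'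
-- ===== Notes on version B (the rewrite author's own statement) =====
-- stated objective: faster
-- what changed: Instead of trying every offset and walking a fresh rotated iterator char-by-char for each (A), B builds the repeated symbol string once (forward and reversed) and does a single substring test `word in symbols*k` each way, delegating the search to CPython's fast two-way substring algorithm.
import Mathlib
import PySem

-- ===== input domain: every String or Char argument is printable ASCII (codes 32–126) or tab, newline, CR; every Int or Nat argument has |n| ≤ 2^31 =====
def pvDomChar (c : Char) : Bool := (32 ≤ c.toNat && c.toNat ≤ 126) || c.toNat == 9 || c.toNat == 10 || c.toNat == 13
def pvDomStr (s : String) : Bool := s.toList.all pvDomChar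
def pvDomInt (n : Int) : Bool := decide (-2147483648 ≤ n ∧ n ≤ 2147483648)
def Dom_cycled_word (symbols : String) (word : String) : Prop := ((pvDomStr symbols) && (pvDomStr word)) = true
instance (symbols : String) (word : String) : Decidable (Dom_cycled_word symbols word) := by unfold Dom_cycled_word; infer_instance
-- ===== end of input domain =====

-- B replaces A's per-offset rotated-iterator walk by two substring tests of `word`
-- in the repeated symbol string (forward and reversed); objective: faster.


-- ===== PORT A =====
-- `for sym in cycled_symbols: …` of check_cycled: `base` is the full cycle,
-- `pos` the rest of the current pass of the iterator, `w` is word_copy.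
def cwGo (base pos w : List Char) : String :=
  match pos, w with
  | [], w =>
      -- the cycle restarts; Python's cycle('') would have raised StopIteration at the
      -- priming __next__ already (check_cycled is never called with empty symbols)
      if _h : base.isEmpty then "NO" else cwGo base base w
  | _ :: _, [] => "YES"
  | p :: rest, c :: w' => if c = p then cwGo base rest w' else "NO"
termination_by 2 * w.length + (if pos = [] then 1 else 0)
decreasing_by
  · simp_all [List.isEmpty_iff]
  · simp only [List.length_cons]; split_ifs <;> omega

-- cycle(symbols) with one element consumed = symbols[1:] then full passes of symbols
def check_cycled (symbols word : List Char) : String :=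
  cwGo symbols (symbols.drop 1) word

def check_other_symbols (symbols word : List Char) (i : Int) : String :=
  let right_answer := check_cycled
    (PySem.List.slice symbols (some i) none ++ PySem.List.slice symbols none (some i)) word
  let left_answer := check_cycled
    (((PySem.List.slice? symbols (some i) none (-1)).getD []) ++
     ((PySem.List.slice? symbols none (some i) (-1)).getD [])) word
  -- slice? with step -1 is never none, so .getD [] is exact
  if right_answer = "YES" ∨ left_answer = "YES" then "YES" else "NO"

-- `for i in range(len(symbols)): …` of cycled_word, first-return semantics
def cwLoop (s w : List Char) : List Int → String
  | [] => "NO"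
  | i :: rest =>
    match PySem.List.pyGet? s i, PySem.List.pyGet? w 0 with
    | some si, some w0 =>
      if si = w0 then
        if check_other_symbols s (PySem.List.slice w (some 1) none) i = "YES" then "YES"
        else cwLoop s w rest
      else cwLoop s w rest
    | _, _ => "NO"    -- word[0] IndexError (word empty): excluded by Pre_

def cycled_word (symbols : String) (word : String) : String :=
  cwLoop symbols.toList word.toList (PySem.List.pyRange 0 (symbols.toList.length : Int) 1)

-- ===== PORT B =====
def cycled_word_alt (symbols : String) (word : String) : String :=
  let s := symbols.toList
  let w := word.toList
  if s.length = 0 then "NO"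
  else
    let reps : Int := PySem.Int.floordiv (w.length : Int) (s.length : Int) + 2
    let fwd := PySem.List.pyRepeat s reps
    let bwd := PySem.List.pyRepeat ((PySem.List.slice? s none none (-1)).getD []) reps
    if PySem.Chars.isIn w fwd || PySem.Chars.isIn w bwd then "YES" else "NO"

-- ===== PRECONDITION & SPEC =====
-- Pre_ excludes exactly the inputs where A raises: word == '' with symbols != ''
-- (A evaluates word[0] -> IndexError there).
def Pre_cycled_word (symbols : String) (word : String) : Prop :=
  word.toList ≠ [] ∨ symbols.toList = []
instance (symbols : String) (word : String) : Decidable (Pre_cycled_word symbols word) := by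
  unfold Pre_cycled_word; infer_instance

def pvWitness_cycled_word : String × String := ("ab", "aba")

def Spec_cycled_word (symbols : String) (word : String) (out : String) : Prop := out = cycled_word_alt symbols word
instance (symbols : String) (word : String) (out : String) : Decidable (Spec_cycled_word symbols word out) := by unfold Spec_cycled_word; infer_instance

-- ===== CLAIM (what is proved, stated in full; the proofs are below) =====
def Claim_equal_cycled_word : Prop := ∀ (symbols : String) (word : String), Dom_cycled_word symbols word → Pre_cycled_word symbols word → Spec_cycled_word symbols word (cycled_word symbols word)

-- ===== LEMMAS AND PROOFS =====

-- The shared characterisation: w read from position k matches s cyclically forward.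
def MatchF (s w : List Char) (k : Nat) : Prop :=
  ∀ j < w.length, w[j]? = s[(k + j) % s.length]?

lemma pv_prefix_iff (w u : List Char) : w <+: u ↔ ∀ j < w.length, w[j]? = u[j]? := by
  constructor
  · rintro ⟨t, rfl⟩ j hj
    exact (List.getElem?_append_left hj).symm
  · intro h
    have hl : w.length ≤ u.length := by
      by_contra hlt
      have h1 := h u.length (by omega)
      rw [List.getElem?_eq_none (le_refl _)] at h1
      have : u.length < w.length := by omega
      simp [List.getElem?_eq_getElem this] at h1
    rw [List.prefix_iff_eq_take]
    apply List.ext_getElem?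
    intro i
    by_cases hi : i < w.length
    · rw [h i hi, List.getElem?_take_of_lt hi]
    · rw [List.getElem?_eq_none (by omega), List.getElem?_eq_none]
      simp [List.length_take]; omega

lemma cwGo_nil_w (base pos : List Char) (hb : base ≠ []) : cwGo base pos [] = "YES" := by
  cases pos with
  | nil =>
    rw [cwGo]
    simp [List.isEmpty_iff, hb]
    cases base with
    | nil => simp_all
    | cons b bs => rw [cwGo]
  | cons p rest => rw [cwGo]

lemma cwGo_step (base : List Char) (d : Nat) (hd : d < base.length) (c : Char) (w : List Char) :
    cwGo base (base.drop d) (c :: w) =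
      if h : c = base[d] then cwGo base (base.drop ((d + 1) % base.length)) w else "NO" := by
  have hdrop : base.drop d = base[d] :: base.drop (d + 1) := List.drop_eq_getElem_cons hd
  rw [hdrop, cwGo]
  by_cases hc : c = base[d]
  · subst hc
    simp only [if_pos rfl, dif_pos rfl]
    by_cases h1 : d + 1 < base.length
    · rw [Nat.mod_eq_of_lt h1]; simp
    · have h2 : d + 1 = base.length := by omega
      have h3 : base.drop (d + 1) = [] := by rw [h2]; simp
      rw [h3, h2, Nat.mod_self, List.drop_zero, cwGo]
      have hb : ¬ base.isEmpty := by simp [List.isEmpty_iff]; intro h; simp [h] at hd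
      simp [hb]
  · simp [hc]

lemma cwGo_char (base : List Char) (hb : base ≠ []) (w : List Char) :
    ∀ d, d < base.length →
      (cwGo base (base.drop d) w = "YES" ↔
        ∀ j < w.length, w[j]? = base[(d + j) % base.length]?) := by
  induction w with
  | nil => intro d hd; simp [cwGo_nil_w base _ hb]
  | cons c w' ih =>
    intro d hd
    rw [cwGo_step base d hd c w']
    by_cases hc : c = base[d]
    · rw [dif_pos hc, ih ((d + 1) % base.length) (Nat.mod_lt _ (by omega))]
      constructor
      · intro h j hj
        cases j with
        | zero =>
          simp only [List.getElem?_cons_zero, Nat.add_zero, Nat.mod_eq_of_lt hd]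
          rw [List.getElem?_eq_getElem hd, hc]
        | succ j =>
          have := h j (by simpa using hj)
          rw [List.getElem?_cons_succ, this, Nat.mod_add_mod]
          have hidx : d + 1 + j = d + (j + 1) := by omega
          rw [hidx]
      · intro h j hj
        have := h (j + 1) (by simpa using hj)
        rw [List.getElem?_cons_succ] at this
        rw [this, Nat.mod_add_mod]
        have hidx : d + 1 + j = d + (j + 1) := by omega
        rw [hidx]
    · rw [dif_neg hc]
      constructor
      · intro h; simp at h
      · intro h
        have := h 0 (by simp)
        simp only [List.getElem?_cons_zero, Nat.add_zero, Nat.mod_eq_of_lt hd,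
          List.getElem?_eq_getElem hd] at this
        exact absurd (Option.some_injective _ this) hc

lemma cwGo_refill (base w : List Char) (hb : base ≠ []) :
    cwGo base [] w = cwGo base base w := by
  rw [cwGo]; simp [List.isEmpty_iff, hb]

lemma check_cycled_char_go (base : List Char) (hb : base ≠ []) (w : List Char) :
    cwGo base (base.drop 1) w = "YES" ↔
      ∀ j < w.length, w[j]? = base[(1 + j) % base.length]? := by
  by_cases h1 : 1 < base.length
  · exact cwGo_char base hb w 1 h1
  · have h2 : base.length = 1 := by
      cases base with
      | nil => simp_all
      | cons b bs => simp at h1 ⊢; omega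
    have h3 : base.drop 1 = [] := by rw [← h2]; simp
    have h4 : base.drop 0 = base := by simp
    rw [h3, cwGo_refill base w hb]
    simpa [h2, Nat.mod_one] using cwGo_char base hb w 0 (by omega)

lemma check_cycled_char (base : List Char) (hb : base ≠ []) (w : List Char) :
    check_cycled base w = "YES" ↔ ∀ j < w.length, w[j]? = base[(1 + j) % base.length]? := by
  unfold check_cycled
  exact check_cycled_char_go base hb w

lemma rot_getElem? (s : List Char) (k t : Nat) (hk : k ≤ s.length) (ht : t < s.length) :
    (s.drop k ++ s.take k)[t]? = s[(k + t) % s.length]? := by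
  by_cases h1 : t < s.length - k
  · rw [List.getElem?_append_left (by simp [List.length_drop]; omega), List.getElem?_drop]
    rw [Nat.mod_eq_of_lt (by omega)]
  · rw [List.getElem?_append_right (by simp [List.length_drop]; omega)]
    simp only [List.length_drop]
    rw [List.getElem?_take_of_lt (by omega)]
    have hmod : (k + t) % s.length = t - (s.length - k) := by
      rw [Nat.mod_eq_sub_mod (by omega), Nat.mod_eq_of_lt (by omega)]
      omega
    rw [hmod]

lemma rightcheck (s : List Char) (k : Nat) (hk : k < s.length) (c : Char) (w' : List Char) :
    (s[k]? = some c ∧ check_cycled (s.drop k ++ s.take k) w' = "YES") ↔ MatchF s (c :: w') k := by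
  have hrotlen : (s.drop k ++ s.take k).length = s.length := by
    simp [List.length_drop, List.length_take]; omega
  have hrotne : (s.drop k ++ s.take k) ≠ [] := by
    intro h; rw [← List.length_eq_zero_iff, hrotlen] at h; omega
  rw [check_cycled_char _ hrotne w']
  constructor
  · rintro ⟨hc, h⟩ j hj
    cases j with
    | zero =>
      simpa [Nat.mod_eq_of_lt hk] using hc.symm
    | succ j =>
      have hj' : j < w'.length := by simpa using hj
      have := h j hj'
      rw [hrotlen] at this
      rw [List.getElem?_cons_succ, this,
        rot_getElem? s k ((1 + j) % s.length) (le_of_lt hk) (Nat.mod_lt _ (by omega)),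
        Nat.add_mod_mod]
      have hidx : k + (1 + j) = k + (j + 1) := by omega
      rw [hidx]
  · intro h
    have hc : s[k]? = some c := by
      have := h 0 (by simp)
      simpa [Nat.mod_eq_of_lt hk] using this.symm
    refine ⟨hc, fun j hj => ?_⟩
    have := h (j + 1) (by simpa using hj)
    rw [List.getElem?_cons_succ] at this
    rw [hrotlen, this,
      rot_getElem? s k ((1 + j) % s.length) (le_of_lt hk) (Nat.mod_lt _ (by omega)),
      Nat.add_mod_mod]
    have hidx : k + (1 + j) = k + (j + 1) := by omega
    rw [hidx]

lemma sl1 (s : List Char) (k : Nat) (hk : k < s.length) :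
    PySem.List.slice? s (some (k : Int)) none (-1) = some ((s.take (k + 1)).reverse) := by
  simp only [PySem.List.slice?, PySem.List.sliceIndices]
  norm_num
  rw [if_neg (by omega : ¬((k:Int) < 0)), min_eq_left (by omega : (k:Int) ≤ (s.length:Int) - 1),
    if_pos (by omega : (-1:Int) < (k:Int)),
    (by omega : ((k:Int) + 1).toNat = k + 1)]
  rw [List.filterMap_congr (g := fun x => some (s.getD (k - x) 'a')) ?_]
  · rw [show (fun x => some (s.getD (k - x) 'a')) = some ∘ (fun x => s.getD (k - x) 'a') from rfl,
      List.filterMap_eq_map]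
    apply List.ext_getElem
    · simp [List.length_take]; omega
    · intro i h1 h2
      simp only [List.getElem_map, List.getElem_range, List.getElem_reverse, List.getElem_take,
        List.length_take]
      have hlen : (List.take (k+1) s).length = k + 1 := by simp [List.length_take]; omega
      have hi : i < k + 1 := by simpa [List.length_map, List.length_range] using h1
      have hlt : k - i < s.length := by omega
      rw [List.getD_eq_getElem s 'a' hlt]
      congr 1
      omega
  · intro x hx
    have hx' : x < k + 1 := List.mem_range.mp hx
    have htn : ((k:Int) + -(x:Int)).toNat = k - x := by omega
    rw [htn]
    have hlt : k - x < s.length := by omega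
    rw [List.getElem?_eq_getElem hlt]
    simp [List.getElem?_eq_getElem hlt]

lemma sl2 (s : List Char) (k : Nat) (hk : k < s.length) :
    PySem.List.slice? s none (some (k : Int)) (-1) = some ((s.drop (k + 1)).reverse) := by
  simp only [PySem.List.slice?, PySem.List.sliceIndices]
  norm_num
  rw [if_neg (by omega : ¬((k:Int) < 0)), min_eq_left (by omega : (k:Int) ≤ (s.length:Int) - 1)]
  by_cases hlast : k = s.length - 1
  · rw [if_neg (by omega : ¬((k:Int) < (s.length:Int) - 1))]
    simp [List.drop_eq_nil_of_le (by omega : s.length ≤ k + 1)]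
  · rw [if_pos (by omega : (k:Int) < (s.length:Int) - 1),
      (by omega : ((s.length:Int) - 1 - (k:Int)).toNat = s.length - 1 - k)]
    rw [List.filterMap_congr (g := fun x => some (s.getD (s.length - 1 - x) 'a')) ?_]
    · rw [show (fun x => some (s.getD (s.length - 1 - x) 'a')) =
          some ∘ (fun x => s.getD (s.length - 1 - x) 'a') from rfl, List.filterMap_eq_map]
      apply List.ext_getElem
      · simp [List.length_drop]; omega
      · intro i h1 h2
        simp only [List.getElem_map, List.getElem_range, List.getElem_reverse, List.getElem_drop,
          List.length_drop]
        have hi : i < s.length - 1 - k := by simpa [List.length_map, List.length_range] using h1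
        have hlt : s.length - 1 - i < s.length := by omega
        rw [List.getD_eq_getElem s 'a' hlt]
        congr 1
        omega
    · intro x hx
      have hx' : x < s.length - 1 - k := List.mem_range.mp hx
      have htn : ((s.length:Int) - 1 + -(x:Int)).toNat = s.length - 1 - x := by omega
      rw [htn]
      have hlt : s.length - 1 - x < s.length := by omega
      rw [List.getElem?_eq_getElem hlt]
      simp [List.getElem?_eq_getElem hlt]

lemma left_base (s : List Char) (k : Nat) (hk : k < s.length) :
    ((PySem.List.slice? s (some (k : Int)) none (-1)).getD []) ++
      ((PySem.List.slice? s none (some (k : Int)) (-1)).getD []) =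
    s.reverse.drop (s.length - 1 - k) ++ s.reverse.take (s.length - 1 - k) := by
  rw [sl1 s k hk, sl2 s k hk]
  simp only [Option.getD_some]
  rw [List.reverse_take, List.reverse_drop,
    (by omega : s.length - (k + 1) = s.length - 1 - k)]

lemma cwLoop_two_valued (s w : List Char) (is : List Int) :
    cwLoop s w is = "YES" ∨ cwLoop s w is = "NO" := by
  induction is with
  | nil => right; rfl
  | cons i rest ih =>
    rw [cwLoop]
    rcases h1 : PySem.List.pyGet? s i with _ | si
    · right; rfl
    · rcases h2 : PySem.List.pyGet? w 0 with _ | w0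
      · right; rfl
      · simp only
        split_ifs <;> simp_all

lemma cwLoop_yes (s : List Char) (c : Char) (w' : List Char) (is : List Int)
    (hall : ∀ i ∈ is, (PySem.List.pyGet? s i).isSome) :
    cwLoop s (c :: w') is = "YES" ↔
      ∃ i ∈ is, PySem.List.pyGet? s i = some c ∧ check_other_symbols s w' i = "YES" := by
  induction is with
  | nil => simp [cwLoop]
  | cons i rest ih =>
    have hallr : ∀ j ∈ rest, (PySem.List.pyGet? s j).isSome :=
      fun j hj => hall j (List.mem_cons_of_mem _ hj)
    obtain ⟨si, h1⟩ := Option.isSome_iff_exists.mp (hall i (List.mem_cons_self ..))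
    have h2 : PySem.List.pyGet? (c :: w') 0 = some c := by
      simp [PySem.List.pyGet?, PySem.List.pyIdx?]
    have hsl : PySem.List.slice (c :: w') (some 1) none = w' := by
      rw [PySem.List.slice_from_one]; rfl
    rw [cwLoop, h1, h2]
    simp only
    by_cases hq : si = c
    · subst hq
      by_cases hco : check_other_symbols s w' i = "YES"
      · rw [if_pos rfl, hsl, if_pos hco]
        exact ⟨fun _ => ⟨i, List.mem_cons_self .., h1, hco⟩, fun _ => rfl⟩
      · rw [if_pos rfl, hsl, if_neg hco, ih hallr]
        constructor
        · rintro ⟨i', hi', h⟩; exact ⟨i', List.mem_cons_of_mem _ hi', h⟩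
        · rintro ⟨i', hi', hc, hco'⟩
          rcases List.mem_cons.mp hi' with rfl | hi'
          · exact absurd hco' hco
          · exact ⟨i', hi', hc, hco'⟩
    · rw [if_neg hq, ih hallr]
      constructor
      · rintro ⟨i', hi', h⟩; exact ⟨i', List.mem_cons_of_mem _ hi', h⟩
      · rintro ⟨i', hi', hc, hco'⟩
        rcases List.mem_cons.mp hi' with rfl | hi'
        · rw [h1, Option.some_inj] at hc; exact absurd hc hq
        · exact ⟨i', hi', hc, hco'⟩

lemma check_other_yes (s : List Char) (c : Char) (w' : List Char) (k : Nat)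
    (hk : k < s.length) (hc : s[k]? = some c) :
    check_other_symbols s w' (k : Int) = "YES" ↔
      (MatchF s (c :: w') k ∨ MatchF s.reverse (c :: w') (s.length - 1 - k)) := by
  have hk' : s.length - 1 - k < s.reverse.length := by rw [List.length_reverse]; omega
  have hcrev : s.reverse[s.length - 1 - k]? = some c := by
    rw [List.getElem?_reverse (by rw [List.length_reverse] at hk'; omega)]
    rw [(by omega : s.length - 1 - (s.length - 1 - k) = k)]
    exact hc
  simp only [check_other_symbols]
  rw [PySem.List.slice_from_natCast, PySem.List.slice_to_natCast, left_base s k hk]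
  split_ifs with h
  · constructor
    · intro _
      rcases h with hr | hl
      · exact Or.inl ((rightcheck s k hk c w').mp ⟨hc, hr⟩)
      · exact Or.inr ((rightcheck s.reverse (s.length - 1 - k) hk' c w').mp ⟨hcrev, hl⟩)
    · intro _; rfl
  · constructor
    · intro hbad; simp at hbad
    · intro hm
      exfalso; apply h
      rcases hm with hm | hm
      · exact Or.inl ((rightcheck s k hk c w').mpr hm).2
      · exact Or.inr ((rightcheck s.reverse (s.length - 1 - k) hk' c w').mpr hm).2

lemma a_char (s : List Char) (hs : s ≠ []) (c : Char) (w' : List Char) :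
    cwLoop s (c :: w') (PySem.List.pyRange 0 (s.length : Int) 1) = "YES" ↔
      ((∃ k < s.length, MatchF s (c :: w') k) ∨ (∃ k < s.length, MatchF s.reverse (c :: w') k)) := by
  have hn : 0 < s.length := List.length_pos_iff.mpr hs
  have hall : ∀ i ∈ PySem.List.pyRange 0 (s.length : Int) 1, (PySem.List.pyGet? s i).isSome := by
    intro i hi
    obtain ⟨h0, hlt⟩ := PySem.List.mem_pyRange_one.mp hi
    obtain ⟨k, rfl⟩ : ∃ k : Nat, i = (k : Int) := ⟨i.toNat, by omega⟩
    rw [PySem.List.pyGet?_natCast]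
    have hk : k < s.length := by exact_mod_cast hlt
    simp [List.getElem?_eq_getElem hk]
  rw [cwLoop_yes s c w' _ hall]
  constructor
  · rintro ⟨i, hi, hc, hco⟩
    obtain ⟨h0, hlt⟩ := PySem.List.mem_pyRange_one.mp hi
    obtain ⟨k, rfl⟩ : ∃ k : Nat, i = (k : Int) := ⟨i.toNat, by omega⟩
    have hk : k < s.length := by exact_mod_cast hlt
    rw [PySem.List.pyGet?_natCast] at hc
    rw [check_other_yes s c w' k hk hc] at hco
    rcases hco with hm | hm
    · exact Or.inl ⟨k, hk, hm⟩
    · exact Or.inr ⟨s.length - 1 - k, by omega, hm⟩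
  · rintro (⟨k, hk, hm⟩ | ⟨k', hk', hm⟩)
    · have hc : s[k]? = some c := ((rightcheck s k hk c w').mpr hm).1
      refine ⟨(k : Int), PySem.List.mem_pyRange_one.mpr ⟨by omega, by exact_mod_cast hk⟩, ?_, ?_⟩
      · rw [PySem.List.pyGet?_natCast]; exact hc
      · exact (check_other_yes s c w' k hk hc).mpr (Or.inl hm)
    · have hkr : k' < s.reverse.length := by rw [List.length_reverse]; exact hk'
      have hc : s[s.length - 1 - k']? = some c := by
        have := ((rightcheck s.reverse k' hkr c w').mpr hm).1
        rw [List.getElem?_reverse (by rw [List.length_reverse] at hkr; omega)] at this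
        exact this
      have hklt : s.length - 1 - k' < s.length := by omega
      refine ⟨((s.length - 1 - k' : Nat) : Int),
        PySem.List.mem_pyRange_one.mpr ⟨by omega, by exact_mod_cast hklt⟩, ?_, ?_⟩
      · rw [PySem.List.pyGet?_natCast]; exact hc
      · refine (check_other_yes s c w' (s.length - 1 - k') hklt hc).mpr (Or.inr ?_)
        rw [(by omega : s.length - 1 - (s.length - 1 - k') = k')]
        exact hm

lemma flat_getElem? (s : List Char) (K : Nat) :
    ∀ t, t < K * s.length → (List.replicate K s).flatten[t]? = s[t % s.length]? := by
  induction K with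
  | zero => intro t ht; omega
  | succ K ih =>
    intro t ht
    rw [List.replicate_succ, List.flatten_cons]
    by_cases h1 : t < s.length
    · rw [List.getElem?_append_left h1, Nat.mod_eq_of_lt h1]
    · have hmul : (K + 1) * s.length = K * s.length + s.length := by ring
      rw [hmul] at ht
      conv_rhs => rw [Nat.mod_eq_sub_mod (by omega : s.length ≤ t)]
      rw [List.getElem?_append_right (by omega), ih (t - s.length) (by omega)]

lemma rep_len (s : List Char) (K : Nat) :
    (PySem.List.pyRepeat s (K : Int)).length = K * s.length := by
  simp [PySem.List.pyRepeat, List.length_flatten, List.map_replicate, List.sum_replicate,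
    smul_eq_mul]

lemma rep_getElem? (s : List Char) (hs : s ≠ []) (K t : Nat) (ht : t < K * s.length) :
    (PySem.List.pyRepeat s (K : Int))[t]? = s[t % s.length]? := by
  have : PySem.List.pyRepeat s (K : Int) = (List.replicate K s).flatten := by
    simp [PySem.List.pyRepeat]
  rw [this, flat_getElem? s K t ht]

lemma repeat_isIn (s w : List Char) (hs : s ≠ []) :
    PySem.Chars.isIn w (PySem.List.pyRepeat s ((w.length / s.length + 2 : Nat) : Int)) = true ↔
      ∃ k < s.length, MatchF s w k := by
  have hn : 0 < s.length := List.length_pos_iff.mpr hs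
  rw [← PySem.Chars.exists_prefix_drop_iff_isIn]
  constructor
  · rintro ⟨t, hpre⟩
    have hpre' := (pv_prefix_iff _ _).mp hpre
    refine ⟨t % s.length, Nat.mod_lt _ hn, ?_⟩
    intro j hj
    have h1 := hpre' j hj
    rw [List.getElem?_drop] at h1
    have hsome : (PySem.List.pyRepeat s ((w.length / s.length + 2 : Nat) : Int))[t + j]?.isSome := by
      rw [← h1]; simp [List.getElem?_eq_getElem hj]
    have hlt : t + j < (w.length / s.length + 2) * s.length := by
      obtain ⟨v, hv⟩ := Option.isSome_iff_exists.mp hsome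
      have := (List.getElem?_eq_some_iff.mp hv).1
      rwa [rep_len] at this
    rw [h1, rep_getElem? s hs _ _ hlt, ← Nat.mod_add_mod]
  · rintro ⟨k, hk, hm⟩
    refine ⟨k, (pv_prefix_iff _ _).mpr ?_⟩
    intro j hj
    have hmul : (w.length / s.length + 2) * s.length
        = s.length * (w.length / s.length) + 2 * s.length := by ring
    have hdm := Nat.div_add_mod w.length s.length
    have hml : w.length % s.length < s.length := Nat.mod_lt _ hn
    have hlt : k + j < (w.length / s.length + 2) * s.length := by omega
    rw [List.getElem?_drop, rep_getElem? s hs _ _ hlt]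
    exact hm j hj

lemma alt_two_valued (symbols word : String) :
    cycled_word_alt symbols word = "YES" ∨ cycled_word_alt symbols word = "NO" := by
  unfold cycled_word_alt
  dsimp only
  split_ifs <;> simp

lemma b_char (symbols word : String) (hs : symbols.toList ≠ []) :
    cycled_word_alt symbols word = "YES" ↔
      ((∃ k < symbols.toList.length, MatchF symbols.toList word.toList k) ∨
       (∃ k < symbols.toList.length, MatchF symbols.toList.reverse word.toList k)) := by
  have hn : 0 < symbols.toList.length := List.length_pos_iff.mpr hs
  unfold cycled_word_alt
  dsimp only
  rw [if_neg (by omega)]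
  simp only [PySem.List.slice?_none_none_neg_one, Option.getD_some]
  have hreps : PySem.Int.floordiv (word.toList.length : Int) (symbols.toList.length : Int) + 2
      = ((word.toList.length / symbols.toList.length + 2 : Nat) : Int) := by
    rw [PySem.Int.floordiv_natCast]; push_cast; ring
  rw [hreps]
  have hrevne : symbols.toList.reverse ≠ [] := by
    intro h; exact hs (List.reverse_eq_nil_iff.mp h)
  have hiff1 := repeat_isIn symbols.toList word.toList hs
  have hiff2 := repeat_isIn symbols.toList.reverse word.toList hrevne
  rw [List.length_reverse] at hiff2
  have key : (PySem.Chars.isIn word.toList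
        (PySem.List.pyRepeat symbols.toList
          ((word.toList.length / symbols.toList.length + 2 : Nat) : Int)) ||
      PySem.Chars.isIn word.toList
        (PySem.List.pyRepeat symbols.toList.reverse
          ((word.toList.length / symbols.toList.length + 2 : Nat) : Int))) = true ↔
      ((∃ k < symbols.toList.length, MatchF symbols.toList word.toList k) ∨
       (∃ k < symbols.toList.length, MatchF symbols.toList.reverse word.toList k)) := by
    rw [Bool.or_eq_true, hiff1, hiff2]
  split_ifs with h
  · exact ⟨fun _ => key.mp h, fun _ => rfl⟩
  · constructor
    · intro hbad; simp at hbad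
    · intro hm; exact absurd (key.mpr hm) h

-- ===== VERDICT (by name: the statement is the Claim_ definition above) =====
theorem cycled_word_spec : Claim_equal_cycled_word := by
  intro symbols word _ hpre
  unfold Spec_cycled_word
  by_cases hs : symbols.toList = []
  · have h0 : symbols.toList.length = 0 := by rw [hs]; rfl
    rw [cycled_word, h0]
    have hrange : PySem.List.pyRange 0 ((0 : Nat) : Int) 1 = [] := by decide
    rw [hrange, cwLoop]
    unfold cycled_word_alt
    rw [if_pos h0]
  · have hw : word.toList ≠ [] := by
      rcases hpre with h | h
      · exact h
      · exact absurd h hs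
    rcases hq : word.toList with _ | ⟨c, w'⟩
    · exact absurd hq hw
    have hA : cycled_word symbols word
        = cwLoop symbols.toList (c :: w')
            (PySem.List.pyRange 0 (symbols.toList.length : Int) 1) := by
      rw [cycled_word, hq]
    have hAiff := a_char symbols.toList hs c w'
    have hBiff := b_char symbols word hs
    rw [hq] at hBiff
    by_cases hp : ((∃ k < symbols.toList.length, MatchF symbols.toList (c :: w') k) ∨
        (∃ k < symbols.toList.length, MatchF symbols.toList.reverse (c :: w') k))
    · rw [hA, hAiff.mpr hp, hBiff.mpr hp]
    · have e1 : cwLoop symbols.toList (c :: w')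
          (PySem.List.pyRange 0 (symbols.toList.length : Int) 1) = "NO" := by
        rcases cwLoop_two_valued symbols.toList (c :: w')
          (PySem.List.pyRange 0 (symbols.toList.length : Int) 1) with h | h
        · exact absurd (hAiff.mp h) hp
        · exact h
      have e2 : cycled_word_alt symbols word = "NO" := by
        rcases alt_two_valued symbols word with h | h
        · exact absurd (hBiff.mp h) hp
        · exact h
      rw [hA, e1, e2]
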